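-- pv_equiv track=rewrite | github.com/skerishKang/124-build-automation | modules/telegram_utils.py | format_ai_text
-- ===== SOURCE A (Python) =====
-- from typing import Tuple
--
-- def format_ai_text(text: str) -> Tuple[str, str]:
--     """Format AI response text for Telegram with proper markdown"""
--     if not text:
--         return "응답이 비어있습니다.", "Markdown"
--
--     # Try to determine if markdown should be used
--     # If text contains markdown elements, use MarkdownV2
--     markdown_indicators = ['**', '*', '`', '_', '[', ']', '(', ')']
--     use_markdown_v2 = any(indicator in text for indicator in markdown_indicators)
--
--     # Clean up text for markdown
--     # Escape special characters for MarkdownV2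
--     if use_markdown_v2:
--         special_chars = ['.', '(', ')', '-', '+', '=', '{', '}', '[', ']', '!', '|', ':']
--         for char in special_chars:
--             text = text.replace(char, f'\\{char}')
--         return text, "MarkdownV2"
--     else:
--         return text, "Markdown"
-- ===== SOURCE B (Python) =====
-- from typing import Tuple
--
-- _SPECIAL = frozenset('.()-+={}[]!|:')
--
-- def format_ai_text(text: str) -> Tuple[str, str]:
--     """Format AI response text for Telegram with proper markdown"""
--     if not text:
--         return "응답이 비어있습니다.", "Markdown"
--     markdown_indicators = ('**', '*', '`', '_', '[', ']', '(', ')')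
--     if any(indicator in text for indicator in markdown_indicators):
--         escaped = ''.join('\\' + c if c in _SPECIAL else c for c in text)
--         return escaped, "MarkdownV2"
--     return text, "Markdown"
-- ===== Notes on version B (the rewrite author's own statement) =====
-- stated objective: alternative
-- what changed: Replaces A's thirteen sequential full-string .replace() scans with one membership set built once and a single pass over the characters joining '\'+c for special characters.
import Mathlib
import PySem

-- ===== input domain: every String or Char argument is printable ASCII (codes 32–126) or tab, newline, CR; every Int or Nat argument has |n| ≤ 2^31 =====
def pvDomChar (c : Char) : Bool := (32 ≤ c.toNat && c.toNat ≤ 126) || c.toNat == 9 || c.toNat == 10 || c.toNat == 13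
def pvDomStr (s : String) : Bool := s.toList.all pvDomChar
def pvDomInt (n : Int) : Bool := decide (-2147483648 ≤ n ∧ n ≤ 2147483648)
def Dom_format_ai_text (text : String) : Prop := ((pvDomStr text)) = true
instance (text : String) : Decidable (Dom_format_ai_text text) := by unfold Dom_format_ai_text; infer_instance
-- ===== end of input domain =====

-- B replaces A's thirteen sequential .replace() scans by one membership set and a single pass over the characters (objective: alternative).

-- ===== PORT A =====
def format_ai_text (text : String) : String × String :=
  if text = "" then ("응답이 비어있습니다.", "Markdown")
  else
    let markdown_indicators : List String := ["**", "*", "`", "_", "[", "]", "(", ")"]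
    let use_markdown_v2 := markdown_indicators.any (fun ind => PySem.Str.isIn ind text)
    if use_markdown_v2 then
      let special_chars : List String := [".", "(", ")", "-", "+", "=", "{", "}", "[", "]", "!", "|", ":"]
      let text2 := special_chars.foldl (fun t ch => PySem.Str.replace t ch ("\\" ++ ch)) text
      (text2, "MarkdownV2")
    else
      (text, "Markdown")

-- ===== PORT B =====
def pvSpecialSet : PySem.Set Char :=
  PySem.Set.ofList ['.', '(', ')', '-', '+', '=', '{', '}', '[', ']', '!', '|', ':']

def format_ai_text_alt (text : String) : String × String :=
  if text = "" then ("응답이 비어있습니다.", "Markdown")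
  else
    let markdown_indicators : List String := ["**", "*", "`", "_", "[", "]", "(", ")"]
    if markdown_indicators.any (fun ind => PySem.Str.isIn ind text) then
      let escaped := PySem.Str.join ""
        (text.toList.map (fun c =>
          if pvSpecialSet.contains c then String.ofList ['\\', c] else String.ofList [c]))
      (escaped, "MarkdownV2")
    else
      (text, "Markdown")

-- ===== PRECONDITION & SPEC =====
def Spec_format_ai_text (text : String) (out : String × String) : Prop := out = format_ai_text_alt text
instance (text : String) (out : String × String) : Decidable (Spec_format_ai_text text out) := by unfold Spec_format_ai_text; infer_instance

-- ===== CLAIM (what is proved, stated in full; the proofs are below) =====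
def Claim_equal_format_ai_text : Prop := ∀ (text : String), Dom_format_ai_text text → Spec_format_ai_text text (format_ai_text text)

-- ===== LEMMAS AND PROOFS =====

-- single-pass escape of the characters of S
def escL (S : List Char) (l : List Char) : List Char :=
  l.flatMap (fun x => if x ∈ S then ['\\', x] else [x])

theorem escL_nil (l : List Char) : escL [] l = l := by
  simp [escL]

-- replacing a single character c by `new` is a flatMap
theorem replace_go_single (c : Char) (new : List Char) :
    ∀ (l : List Char) (acc : List Char) (fuel : Nat), l.length ≤ fuel →
      PySem.Chars.replace.go [c] new fuel l acc
        = acc.reverse ++ l.flatMap (fun x => if x = c then new else [x]) := by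
  intro l
  induction l with
  | nil =>
    intro acc fuel _
    cases fuel <;> simp [PySem.Chars.replace.go]
  | cons x t ih =>
    intro acc fuel hf
    cases fuel with
    | zero => simp at hf
    | succ fuel =>
      have hf' : t.length ≤ fuel := by simpa using Nat.le_of_succ_le_succ hf
      by_cases hx : x = c
      · subst hx
        rw [PySem.Chars.replace.go]
        simp [List.isPrefixOf, ih (new.reverse ++ acc) fuel hf']
      · rw [PySem.Chars.replace.go]
        have hbeq : (c == x) = false := by simp [Ne.symm hx]
        simp [List.isPrefixOf, hbeq, ih (x :: acc) fuel hf', hx]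

theorem replace_single (c : Char) (new : List Char) (l : List Char) :
    PySem.Chars.replace l [c] new = l.flatMap (fun x => if x = c then new else [x]) := by
  rw [PySem.Chars.replace]
  simp only [List.isEmpty_cons, Bool.false_eq_true, if_false]
  simpa using replace_go_single c new l [] l.length (le_refl _)

-- one more replace extends the escaped set on the right
theorem replace_escL (S : List Char) (c : Char) (l : List Char)
    (hc : c ≠ '\\') (hcS : c ∉ S) (hS : '\\' ∉ S) :
    PySem.Chars.replace (escL S l) [c] ['\\', c] = escL (S ++ [c]) l := by
  rw [replace_single, escL, escL, List.flatMap_assoc]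
  apply List.flatMap_congr
  intro x _
  by_cases hxS : x ∈ S
  · have hxc : x ≠ c := fun h => hcS (h ▸ hxS)
    simp [hxS, hxc, Ne.symm hc]
  · by_cases hxc : x = c
    · subst hxc; simp [hxS]
    · simp [hxS, hxc]

theorem foldl_replace (cs : List Char) :
    ∀ (S : List Char) (l : List Char),
      (∀ c ∈ cs, c ≠ '\\' ∧ c ∉ S) → '\\' ∉ S → cs.Nodup →
      cs.foldl (fun t c => PySem.Chars.replace t [c] ['\\', c]) (escL S l)
        = escL (S ++ cs) l := by
  induction cs with
  | nil => intro S l _ _ _; simp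
  | cons c cs ih =>
    intro S l hall hS hnd
    have hc := hall c (List.mem_cons_self ..)
    simp only [List.foldl_cons]
    rw [replace_escL S c l hc.1 hc.2 hS]
    rw [ih (S ++ [c]) l ?_ ?_ (List.Nodup.of_cons hnd)]
    · simp
    · intro d hd
      have := hall d (List.mem_cons_of_mem _ hd)
      refine ⟨this.1, ?_⟩
      simp only [List.mem_append, List.mem_singleton]
      rintro (h | h)
      · exact this.2 h
      · exact (List.nodup_cons.mp hnd).1 (h ▸ hd)
    · simp [hS, Ne.symm hc.1]

-- Chars.join with empty separator is flatten
theorem join_nil_flatten : ∀ (parts : List (List Char)), PySem.Chars.join [] parts = parts.flatten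
  | [] => rfl
  | [x] => by simp [PySem.Chars.join, List.intercalate, List.intersperse]
  | x :: y :: t => by
      have ih := join_nil_flatten (y :: t)
      simp only [PySem.Chars.join, List.intercalate, List.intersperse, List.flatten_cons] at ih ⊢
      simp [ih]

-- B's join over the mapped characters is a flatMap
theorem join_map_escape (l : List Char) :
    (PySem.Str.join ""
      (l.map (fun c =>
        if pvSpecialSet.contains c then String.ofList ['\\', c] else String.ofList [c]))).toList
      = escL ['.', '(', ')', '-', '+', '=', '{', '}', '[', ']', '!', '|', ':'] l := by
  simp only [PySem.Str.join, String.toList_ofList]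
  rw [show ("" : String).toList = [] from rfl, join_nil_flatten, List.map_map]
  rw [escL, List.flatMap_def]
  congr 1
  apply List.map_congr_left
  intro c _
  simp only [Function.comp_apply]
  by_cases h : c ∈ (['.', '(', ')', '-', '+', '=', '{', '}', '[', ']', '!', '|', ':'] : List Char)
  · have hc2 : pvSpecialSet.contains c = true :=
      (PySem.Set.contains_iff _ _).mpr ((PySem.Set.mem_ofList _ c).mpr h)
    rw [if_pos hc2, if_pos h, String.toList_ofList]
  · have hc2 : ¬ pvSpecialSet.contains c = true := fun hb =>
      h ((PySem.Set.mem_ofList _ c).mp ((PySem.Set.contains_iff _ _).mp hb))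
    rw [if_neg hc2, if_neg h, String.toList_ofList]

-- A's fold over the one-character special strings, at String level
set_option maxRecDepth 100000 in
theorem a_fold_eq (text : String) :
    (([".", "(", ")", "-", "+", "=", "{", "}", "[", "]", "!", "|", ":"] : List String).foldl
        (fun t ch => PySem.Str.replace t ch ("\\" ++ ch)) text).toList
      = escL ['.', '(', ')', '-', '+', '=', '{', '}', '[', ']', '!', '|', ':'] text.toList := by
  have h := foldl_replace ['.', '(', ')', '-', '+', '=', '{', '}', '[', ']', '!', '|', ':']
    [] text.toList (by intro c hc; refine ⟨?_, by simp⟩; fin_cases hc <;> decide)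
    (by simp) (by decide)
  rw [escL_nil] at h
  simp only [List.nil_append] at h
  rw [← h]
  simp only [List.foldl_cons, List.foldl_nil, PySem.Str.toList_replace]
  simp

-- ===== VERDICT (by name: the statement is the Claim_ definition above) =====
theorem format_ai_text_spec : Claim_equal_format_ai_text := by
  intro text _
  unfold Spec_format_ai_text format_ai_text format_ai_text_alt
  by_cases h0 : text = ""
  · simp [h0]
  · simp only [h0, if_false]
    by_cases hmd : (["**", "*", "`", "_", "[", "]", "(", ")"] : List String).any
        (fun ind => PySem.Str.isIn ind text) = true
    · rw [if_pos hmd, if_pos hmd]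
      exact Prod.ext (String.toList_inj.mp (by rw [a_fold_eq, join_map_escape])) rfl
    · rw [if_neg hmd, if_neg hmd]
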